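-- pv_equiv track=rewrite | github.com/akaif95/2D-Practice | 2D_Practice.py | dups_lol
-- ===== SOURCE A (Python) =====
-- def dups_lol(lol):
--     duplicate_lst = []
--
--     for row in lol:
--         for value in row:
--             if value not in duplicate_lst:
--                 duplicate_lst.append(value)
--             else:
--                 return True
--     return False
-- ===== SOURCE B (Python) =====
-- def dups_lol(lol):
--     flat = [v for row in lol for v in row]
--     return len(flat) != len(set(flat))
-- ===== Notes on version B (the rewrite author's own statement) =====
-- stated objective: simpler
-- what changed: Replaces A's nested loop with an incrementally grown membership list and early return by a one-shot flatten plus a cardinality comparison between the flat list and its set of distinct elements.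
import Mathlib
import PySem

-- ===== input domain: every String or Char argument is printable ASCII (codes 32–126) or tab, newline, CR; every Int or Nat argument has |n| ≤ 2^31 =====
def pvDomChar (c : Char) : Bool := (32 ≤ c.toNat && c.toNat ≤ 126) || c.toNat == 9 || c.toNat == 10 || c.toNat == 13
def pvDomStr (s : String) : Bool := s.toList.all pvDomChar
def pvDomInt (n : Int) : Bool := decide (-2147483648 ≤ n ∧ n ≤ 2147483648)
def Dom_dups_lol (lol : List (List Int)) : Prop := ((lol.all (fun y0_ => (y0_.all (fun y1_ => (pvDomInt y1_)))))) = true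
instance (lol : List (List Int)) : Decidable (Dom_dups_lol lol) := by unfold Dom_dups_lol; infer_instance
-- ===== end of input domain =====

-- B replaces A's nested loop with growing membership list and early return by a
-- flatten + cardinality comparison against the set of distinct values (objective: simpler).

-- ===== PORT A =====
-- inner 'for value in row' loop: none = the early 'return True' fired, some seen = updated duplicate_lst
def dups_lol_go (seen : List Int) : List Int → Option (List Int)
  | [] => some seen
  | v :: rest =>
    if ¬ seen.contains v then dups_lol_go (seen ++ [v]) rest
    else none

-- outer 'for row in lol' loop
def dups_lol_rows (seen : List Int) : List (List Int) → Bool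
  | [] => false
  | row :: rest =>
    match dups_lol_go seen row with
    | none => true
    | some s => dups_lol_rows s rest

def dups_lol (lol : List (List Int)) : Bool := dups_lol_rows [] lol

-- ===== PORT B =====
-- flat = [v for row in lol for v in row]; return len(flat) != len(set(flat))
def dups_lol_alt (lol : List (List Int)) : Bool :=
  (lol.flatMap (fun row => row)).length != (PySem.Set.ofList (lol.flatMap (fun row => row))).length

-- ===== PRECONDITION & SPEC =====
def Spec_dups_lol (lol : List (List Int)) (out : Bool) : Prop := out = dups_lol_alt lol
instance (lol : List (List Int)) (out : Bool) : Decidable (Spec_dups_lol lol out) := by unfold Spec_dups_lol; infer_instance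

-- ===== CLAIM (what is proved, stated in full; the proofs are below) =====
def Claim_equal_dups_lol : Prop := ∀ (lol : List (List Int)), Dom_dups_lol lol → Spec_dups_lol lol (dups_lol lol)

-- ===== LEMMAS AND PROOFS =====

theorem go_spec (row : List Int) : ∀ (seen : List Int), seen.Nodup →
    dups_lol_go seen row = if (seen ++ row).Nodup then some (seen ++ row) else none := by
  induction row with
  | nil => intro seen h; simp [dups_lol_go, h]
  | cons v rest ih =>
    intro seen h
    by_cases hv : v ∈ seen
    · have hnd : ¬ (seen ++ v :: rest).Nodup := fun hc =>
        (List.disjoint_of_nodup_append hc) hv (by simp)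
      simp [dups_lol_go, hv, hnd]
    · have hsn : (seen ++ [v]).Nodup := by
        simp [List.nodup_append, h]
        exact fun a ha hav => hv (hav ▸ ha)
      have := ih (seen ++ [v]) hsn
      simp only [dups_lol_go, List.contains_eq_mem, hv, decide_false]
      rw [if_pos (by simp), this, List.append_assoc]
      simp

theorem rows_spec (rows : List (List Int)) : ∀ (seen : List Int), seen.Nodup →
    dups_lol_rows seen rows = !decide ((seen ++ rows.flatten).Nodup) := by
  induction rows with
  | nil => intro seen h; simp [dups_lol_rows, h]
  | cons row rest ih =>
    intro seen h
    rw [dups_lol_rows, go_spec row seen h]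
    by_cases hn : (seen ++ row).Nodup
    · rw [if_pos hn]
      simp only [ih (seen ++ row) hn, List.flatten_cons, ← List.append_assoc]
    · rw [if_neg hn]
      have hbig : ¬ ((seen ++ row) ++ rest.flatten).Nodup := fun hc =>
        hn (List.Nodup.sublist ((seen ++ row).sublist_append_left _) hc)
      have hbig' : ¬ (seen ++ (row ++ rest.flatten)).Nodup := by
        rw [← List.append_assoc]; exact hbig
      simp [hbig']

-- foldl add: length never exceeds input count, and equality exactly at Nodup
theorem foldl_add_spec (xs : List Int) : ∀ (s : List Int), s.Nodup →
    (xs.foldl PySem.Set.add s).length ≤ s.length + xs.length ∧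
    (((s ++ xs).Nodup) ↔ (xs.foldl PySem.Set.add s).length = s.length + xs.length) := by
  induction xs with
  | nil => intro s h; simp [h]
  | cons x rest ih =>
    intro s h
    by_cases hx : x ∈ s
    · have hadd : PySem.Set.add s x = s := by simp [PySem.Set.add, hx]
      have ⟨hle, _⟩ := ih s h
      refine ⟨by simp only [List.foldl_cons, hadd, List.length_cons]; omega, ?_, ?_⟩
      · intro hc
        exact absurd ((List.disjoint_of_nodup_append hc) hx (by simp)) (fun f => f)
      · intro heq
        exfalso
        rw [List.foldl_cons, hadd] at heq
        simp only [List.length_cons] at heq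
        omega
    · have hadd : PySem.Set.add s x = s ++ [x] := by simp [PySem.Set.add, hx]
      have hsn : (s ++ [x]).Nodup := by
        simp [List.nodup_append, h]
        exact fun a ha hav => hx (hav ▸ ha)
      have ⟨hle, hiff⟩ := ih (s ++ [x]) hsn
      simp only [List.foldl_cons, hadd]
      constructor
      · simp at hle ⊢; omega
      · rw [show s ++ x :: rest = (s ++ [x]) ++ rest by simp]
        rw [hiff]
        simp at hle ⊢
        omega

theorem alt_char (lol : List (List Int)) :
    dups_lol_alt lol = !decide (lol.flatten.Nodup) := by
  unfold dups_lol_alt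
  have hflat : lol.flatMap (fun row => row) = lol.flatten := by simp [List.flatMap_def]
  rw [hflat]

  have ⟨hle, hiff⟩ := foldl_add_spec lol.flatten [] (by simp)
  simp only [List.nil_append, List.length_nil, Nat.zero_add] at hle hiff
  have : PySem.Set.ofList lol.flatten = lol.flatten.foldl PySem.Set.add [] := rfl
  rw [this]
  by_cases hn : lol.flatten.Nodup
  · simp [hn, (hiff.mp hn)]
  · have hne : (lol.flatten.foldl PySem.Set.add []).length ≠ lol.flatten.length := by
      intro hc; exact hn (hiff.mpr hc)
    rw [show (decide lol.flatten.Nodup) = false from decide_eq_false hn]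
    simp only [Bool.not_false, bne_iff_ne, ne_eq]
    exact fun hc => hne hc.symm

-- ===== VERDICT (by name: the statement is the Claim_ definition above) =====
theorem dups_lol_spec : Claim_equal_dups_lol := by
  intro lol _
  unfold Spec_dups_lol
  rw [alt_char, dups_lol, rows_spec lol [] (by simp)]
  simp
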